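-- pv_equiv track=rewrite | github.com/Indhumathi1505/Placement-Aiproject | ai-service/routers/skill_gap.py | estimate_current_level
-- ===== SOURCE A (Python) =====
-- def estimate_current_level(skill: str, student_skills: list[str]) -> int:
--     """Rough estimate of current proficiency level based on skill presence."""
--     skill_lower = skill.lower()
--     student_lower = [s.lower() for s in student_skills]
--     if skill_lower in student_lower:
--         return 65  # assume intermediate if listed
--     for s in student_lower:
--         if skill_lower in s or s in skill_lower:
--             return 40  # partial match = beginner
--     return 5  # not in resume
-- ===== SOURCE B (Python) =====
-- def estimate_current_level(skill: str, student_skills: list[str]) -> int: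
--     """Single scoring pass + running max instead of two prioritized passes."""
--     skill_lower = skill.lower()
--     best = 0
--     for s in student_skills:
--         sl = s.lower()
--         if sl == skill_lower:
--             score = 65
--         elif skill_lower in sl or sl in skill_lower:
--             score = 40
--         else:
--             score = 0
--         if score > best:
--             best = score
--     return best if best != 0 else 5
-- ===== Notes on version B (the rewrite author's own statement) =====
-- stated objective: alternative
-- what changed: Replaces A's two prioritized passes (list membership check, then a substring-match loop) with a single loop computing a per-element score (65 exact, 40 partial, 0 none) and a running maximum, returning 5 when the maximum is 0.
import Mathlib
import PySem

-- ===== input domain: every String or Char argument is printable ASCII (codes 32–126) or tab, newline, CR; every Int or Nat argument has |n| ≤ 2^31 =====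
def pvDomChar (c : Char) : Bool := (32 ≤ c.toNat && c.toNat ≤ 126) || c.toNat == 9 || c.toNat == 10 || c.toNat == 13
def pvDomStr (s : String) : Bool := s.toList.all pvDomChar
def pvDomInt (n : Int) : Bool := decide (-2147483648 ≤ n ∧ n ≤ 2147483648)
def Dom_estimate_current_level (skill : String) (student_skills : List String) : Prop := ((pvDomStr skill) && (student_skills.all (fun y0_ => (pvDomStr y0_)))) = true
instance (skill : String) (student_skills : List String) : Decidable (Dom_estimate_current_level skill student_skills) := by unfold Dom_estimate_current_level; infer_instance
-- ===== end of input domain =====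

-- B replaces A's two prioritized passes with one scoring pass and a running maximum (alternative decomposition, same cost).


-- ===== PORT A =====
-- Loop of A: scan the lowered list, return 40 on the first partial match, else 5.
def pvALoop (k : String) : List String → Int
  | [] => 5
  | s :: rest =>
      if PySem.Str.isIn k s || PySem.Str.isIn s k then 40 else pvALoop k rest

def estimate_current_level (skill : String) (student_skills : List String) : Int :=
  let skill_lower := PySem.Str.lower skill
  let student_lower := student_skills.map PySem.Str.lower
  if skill_lower ∈ student_lower then 65 else pvALoop skill_lower student_lower

-- ===== PORT B =====
-- Per-element score of B: 65 exact match, 40 partial (substring either way), 0 otherwise.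
def pvScore (k sl : String) : Int :=
  if sl = k then 65 else if PySem.Str.isIn k sl || PySem.Str.isIn sl k then 40 else 0

def estimate_current_level_alt (skill : String) (student_skills : List String) : Int :=
  let skill_lower := PySem.Str.lower skill
  let best := student_skills.foldl
    (fun b s =>
      let score := pvScore skill_lower (PySem.Str.lower s)
      if score > b then score else b) 0
  if best ≠ 0 then best else 5

-- ===== PRECONDITION & SPEC =====
def Spec_estimate_current_level (skill : String) (student_skills : List String) (out : Int) : Prop := out = estimate_current_level_alt skill student_skills
instance (skill : String) (student_skills : List String) (out : Int) : Decidable (Spec_estimate_current_level skill student_skills out) := by unfold Spec_estimate_current_level; infer_instance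

-- ===== CLAIM (what is proved, stated in full; the proofs are below) =====
def Claim_equal_estimate_current_level : Prop := ∀ (skill : String) (student_skills : List String), Dom_estimate_current_level skill student_skills → Spec_estimate_current_level skill student_skills (estimate_current_level skill student_skills)

-- ===== LEMMAS AND PROOFS =====

-- Structural form of B's running maximum.
def pvBest (k : String) : List String → Int
  | [] => 0
  | s :: rest => max (pvScore k (PySem.Str.lower s)) (pvBest k rest)

theorem pvScore_cases (k sl : String) :
    pvScore k sl = 0 ∨ pvScore k sl = 40 ∨ pvScore k sl = 65 := by
  unfold pvScore; split_ifs <;> simp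

theorem pvBest_cases (k : String) (l : List String) :
    pvBest k l = 0 ∨ pvBest k l = 40 ∨ pvBest k l = 65 := by
  induction l with
  | nil => left; rfl
  | cons s rest ih =>
      rcases pvScore_cases k (PySem.Str.lower s) with h | h | h <;>
        rcases ih with h2 | h2 | h2 <;> simp [pvBest, h, h2]

theorem pvBest_nonneg (k : String) (l : List String) : 0 ≤ pvBest k l := by
  rcases pvBest_cases k l with h | h | h <;> omega

theorem pvBest_le (k : String) (l : List String) : pvBest k l ≤ 65 := by
  rcases pvBest_cases k l with h | h | h <;> omega

theorem pvScore_eq_65_iff (k sl : String) : pvScore k sl = 65 ↔ sl = k := by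
  unfold pvScore; split_ifs <;> simp_all

theorem pvBest_eq_65_iff (k : String) (l : List String) :
    pvBest k l = 65 ↔ k ∈ l.map PySem.Str.lower := by
  induction l with
  | nil => simp [pvBest]
  | cons s rest ih =>
      simp only [pvBest, List.map_cons, List.mem_cons]
      constructor
      · intro h
        rcases pvScore_cases k (PySem.Str.lower s) with hs | hs | hs <;>
          rcases pvBest_cases k rest with hb | hb | hb <;>
            simp [hs, hb] at h <;> try omega
        all_goals first
          | (left; exact ((pvScore_eq_65_iff _ _).1 hs).symm)
          | (right; exact ih.1 hb)
      · rintro (h | h)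
        · have h65 : pvScore k (PySem.Str.lower s) = 65 :=
            (pvScore_eq_65_iff _ _).2 h.symm
          rw [h65, max_eq_left (pvBest_le k rest)]
        · rw [ih.2 h, max_eq_right (by
            rcases pvScore_cases k (PySem.Str.lower s) with h2 | h2 | h2 <;> omega)]

-- B's foldl with accumulator b (0 ≤ b) equals max b (pvBest k l).
theorem pvFold_eq (k : String) (l : List String) :
    ∀ b : Int, 0 ≤ b →
      l.foldl (fun b s =>
        let score := pvScore k (PySem.Str.lower s)
        if score > b then score else b) b = max b (pvBest k l) := by
  induction l with
  | nil => intro b hb; simp [pvBest, max_eq_left hb]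
  | cons s rest ih =>
      intro b hb
      simp only [List.foldl_cons, pvBest]
      have hs := pvScore_cases k (PySem.Str.lower s)
      have step : (let score := pvScore k (PySem.Str.lower s)
          if score > b then score else b) = max b (pvScore k (PySem.Str.lower s)) := by
        by_cases h : pvScore k (PySem.Str.lower s) > b
        · simp [h, max_eq_right (le_of_lt h)]
        · simp [h, max_eq_left (not_lt.1 h)]
      rw [step, ih _ (le_trans hb (le_max_left _ _)), max_assoc]

theorem main_eq (k : String) (l : List String) :
    (if k ∈ l.map PySem.Str.lower then (65 : Int) else pvALoop k (l.map PySem.Str.lower))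
      = (if pvBest k l ≠ 0 then pvBest k l else 5) := by
  induction l with
  | nil => simp [pvALoop, pvBest]
  | cons s rest ih =>
      simp only [List.map_cons, List.mem_cons, pvBest]
      by_cases hex : k = PySem.Str.lower s
      · have h65 : pvScore k (PySem.Str.lower s) = 65 :=
          (pvScore_eq_65_iff _ _).2 hex.symm
        rw [if_pos (Or.inl hex), h65, max_eq_left (pvBest_le k rest)]
        norm_num
      · by_cases hmem : k ∈ rest.map PySem.Str.lower
        · have hb : pvBest k rest = 65 := (pvBest_eq_65_iff _ _).2 hmem
          have := pvScore_cases k (PySem.Str.lower s)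
          have hle : pvScore k (PySem.Str.lower s) ≤ 65 := by omega
          simp [hmem, hb, max_eq_right hle]
        · have hb65 : pvBest k rest ≠ 65 := fun h => hmem ((pvBest_eq_65_iff _ _).1 h)
          have hbc := pvBest_cases k rest
          have hmem' : ¬(k = PySem.Str.lower s ∨ k ∈ List.map PySem.Str.lower rest) := by
            tauto
          rw [if_neg hmem']
          rw [if_neg hmem] at ih
          by_cases hpart : (PySem.Str.isIn k (PySem.Str.lower s)
              || PySem.Str.isIn (PySem.Str.lower s) k) = true
          · have hs40 : pvScore k (PySem.Str.lower s) = 40 := by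
              unfold pvScore
              rw [if_neg (fun h => hex h.symm), if_pos hpart]
            have hmax : max (pvScore k (PySem.Str.lower s)) (pvBest k rest) = 40 := by
              rw [hs40]; rcases hbc with h | h | h <;> simp [h] at hb65 ⊢
            have hloop : pvALoop k (PySem.Str.lower s :: List.map PySem.Str.lower rest) = 40 := by
              unfold pvALoop; rw [if_pos hpart]
            rw [hloop, hmax]; norm_num
          · have hs0 : pvScore k (PySem.Str.lower s) = 0 := by
              unfold pvScore
              rw [if_neg (fun h => hex h.symm), if_neg hpart]
            have hmax : max (pvScore k (PySem.Str.lower s)) (pvBest k rest) = pvBest k rest := by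
              rw [hs0]; rcases hbc with h | h | h <;> simp [h]
            have hloop : pvALoop k (PySem.Str.lower s :: List.map PySem.Str.lower rest)
                = pvALoop k (List.map PySem.Str.lower rest) := by
              unfold pvALoop; rw [if_neg hpart]
              cases List.map PySem.Str.lower rest <;> rfl
            rw [hloop, hmax]; exact ih

-- ===== VERDICT (by name: the statement is the Claim_ definition above) =====
theorem estimate_current_level_spec : Claim_equal_estimate_current_level := by
  intro skill student_skills _
  unfold Spec_estimate_current_level estimate_current_level estimate_current_level_alt
  simp only []
  rw [pvFold_eq (PySem.Str.lower skill) student_skills 0 le_rfl,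
      max_eq_right (pvBest_nonneg _ _)]
  exact main_eq (PySem.Str.lower skill) student_skills
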